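-- pv_equiv track=rewrite | github.com/Megachile/synteny_pipeline | 04_extract_flanking.py | get_flanking_genes
-- ===== SOURCE A (Python) =====
-- from typing import Dict, List, Tuple, Optional
--
-- def get_flanking_genes(
--     target_gene_id: str,
--     scaffold: str,
--     gene_index: Dict[str, List[Dict]],
--     n_upstream: int = 10,
--     n_downstream: int = 10,
-- ) -> Tuple[List[Dict], List[Dict]]:
--     """
--     DEPRECATED: Use get_flanking_genes_for_cluster() instead.
--
--     Get N upstream and N downstream genes from a target gene.
--     """
--     scaffold_genes = gene_index.get(scaffold, [])
--     if not scaffold_genes: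
--         return [], []
--
--     target_idx = None
--     for i, gene in enumerate(scaffold_genes):
--         if gene['gene_id'] == target_gene_id:
--             target_idx = i
--             break
--
--     if target_idx is None:
--         return [], []
--
--     upstream = scaffold_genes[max(0, target_idx - n_upstream):target_idx]
--     upstream = list(reversed(upstream))
--
--     downstream = scaffold_genes[target_idx + 1:target_idx + 1 + n_downstream]
--
--     return upstream, downstream
-- ===== SOURCE B (Python) =====
-- def get_flanking_genes(
--     target_gene_id,
--     scaffold,
--     gene_index,
--     n_upstream=10,
--     n_downstream=10,
-- ):
--     """Single forward pass: keep a sliding window of the last n_upstream genes;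
--     on hitting the target, the window (reversed, nearest first) is the upstream
--     list and the next n_downstream genes from the same iterator are the
--     downstream list."""
--     it = iter(gene_index.get(scaffold, []))
--     window = []
--     for gene in it:
--         if gene['gene_id'] == target_gene_id:
--             downstream = []
--             for g in it:
--                 if len(downstream) >= n_downstream:
--                     break
--                 downstream.append(g)
--             window.reverse()
--             return window, downstream
--         window.append(gene)
--         if len(window) > n_upstream:
--             window.pop(0)
--     return [], []
-- ===== Notes on version B (the rewrite author's own statement) =====
-- stated objective: alternative
-- what changed: Replaces A's locate-index-then-slice (find target index, then compute two slices with max/reversed) by a single forward pass over the scaffold's genes that maintains a sliding window of the last n_upstream genes and, once the target is hit, collects the next n_downstream genes from the same iterator.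
-- intended difference: On inputs whose target gene sits at index i with -(len) < n_downstream < -(i+1), A's downstream slice scaffold_genes[i+1 : i+1+n_downstream] gets a negative stop and wraps around, returning genes taken from the end of the scaffold, while B returns [] downstream, the intended result of requesting a non-positive number of downstream genes. — e.g. on get_flanking_genes("a", "s", [("s", [[("gene_id", "a")], [("gene_id", "b")], [("gene_id", "c")]])], 0, -2): A returns ([], [[("gene_id", "b")]]), B returns ([], [])
import Mathlib
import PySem

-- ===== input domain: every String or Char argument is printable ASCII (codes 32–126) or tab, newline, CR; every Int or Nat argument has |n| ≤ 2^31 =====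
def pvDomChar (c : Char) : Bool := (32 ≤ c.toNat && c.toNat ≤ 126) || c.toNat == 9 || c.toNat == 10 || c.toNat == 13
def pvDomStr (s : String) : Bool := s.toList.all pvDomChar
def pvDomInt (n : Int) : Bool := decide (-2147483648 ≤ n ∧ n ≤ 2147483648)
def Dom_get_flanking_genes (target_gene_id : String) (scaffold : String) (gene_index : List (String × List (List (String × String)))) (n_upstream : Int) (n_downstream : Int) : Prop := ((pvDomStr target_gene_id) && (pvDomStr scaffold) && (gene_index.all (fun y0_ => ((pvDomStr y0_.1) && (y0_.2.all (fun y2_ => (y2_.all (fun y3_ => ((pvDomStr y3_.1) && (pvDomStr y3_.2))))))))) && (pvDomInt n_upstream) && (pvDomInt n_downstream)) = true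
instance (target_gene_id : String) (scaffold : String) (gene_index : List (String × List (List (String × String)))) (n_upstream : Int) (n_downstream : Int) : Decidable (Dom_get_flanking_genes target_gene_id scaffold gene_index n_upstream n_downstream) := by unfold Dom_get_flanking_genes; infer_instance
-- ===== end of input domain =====

-- B replaces A's locate-index-then-slice with a single forward pass keeping a sliding window of
-- the last n_upstream genes (alternative decomposition, similar cost); on the D_ inputs (negative
-- n_downstream reaching past the start of the slice) A's slice wraps from the scaffold's end
-- while B returns no downstream genes, which is the intended reading of a downstream count.

-- ===== PORT A =====
-- the 'for i, gene in enumerate(...)' search loop with its break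
def pvFindLoop (t : String) : Nat → List (List (String × String)) → Option Nat
  | _, [] => none
  | i, g :: rest =>
    if (PySem.Dict.mk g).get? "gene_id" = some t then some i
    else pvFindLoop t (i + 1) rest

def get_flanking_genes (target_gene_id : String) (scaffold : String) (gene_index : List (String × List (List (String × String)))) (n_upstream : Int) (n_downstream : Int) : (List (List (String × String))) × (List (List (String × String))) :=
  let scaffold_genes := (PySem.Dict.mk gene_index).getD scaffold []
  if scaffold_genes = [] then ([], [])
  else
    match pvFindLoop target_gene_id 0 scaffold_genes with
    | none => ([], [])
    | some target_idx =>
      ((PySem.List.slice scaffold_genes (some (max 0 ((target_idx : Int) - n_upstream))) (some (target_idx : Int))).reverse,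
       PySem.List.slice scaffold_genes (some ((target_idx : Int) + 1)) (some ((target_idx : Int) + 1 + n_downstream)))

-- ===== PORT B =====
-- 'for g in it: if len(downstream) >= n_downstream: break; downstream.append(g)'
def pvTakeDown (nd : Int) (acc : List (List (String × String))) : List (List (String × String)) → List (List (String × String))
  | [] => acc
  | g :: rest => if (acc.length : Int) ≥ nd then acc else pvTakeDown nd (acc ++ [g]) rest

-- the single forward pass with its sliding window
def pvScan (t : String) (nu nd : Int) (window : List (List (String × String))) : List (List (String × String)) → (List (List (String × String))) × (List (List (String × String)))
  | [] => ([], [])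
  | g :: rest =>
    if (PySem.Dict.mk g).get? "gene_id" = some t then
      (window.reverse, pvTakeDown nd [] rest)
    else
      let w := window ++ [g]
      pvScan t nu nd (if (w.length : Int) > nu then w.drop 1 else w) rest

def get_flanking_genes_alt (target_gene_id : String) (scaffold : String) (gene_index : List (String × List (List (String × String)))) (n_upstream : Int) (n_downstream : Int) : (List (List (String × String))) × (List (List (String × String))) :=
  pvScan target_gene_id n_upstream n_downstream [] ((PySem.Dict.mk gene_index).getD scaffold [])

-- ===== PRECONDITION & SPEC =====
-- Pre_ excludes exactly the inputs on which Python A raises KeyError: a scaffold gene without a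
-- 'gene_id' key that the search loop scans (i.e. before the first gene matching the target).
def Pre_get_flanking_genes (target_gene_id : String) (scaffold : String) (gene_index : List (String × List (List (String × String)))) (n_upstream : Int) (n_downstream : Int) : Prop :=
  ∀ g ∈ ((PySem.Dict.mk gene_index).getD scaffold []).takeWhile
      (fun g => (PySem.Dict.mk g).get? "gene_id" != some target_gene_id),
    ((PySem.Dict.mk g).get? "gene_id").isSome = true
instance (target_gene_id : String) (scaffold : String) (gene_index : List (String × List (List (String × String)))) (n_upstream : Int) (n_downstream : Int) : Decidable (Pre_get_flanking_genes target_gene_id scaffold gene_index n_upstream n_downstream) := by unfold Pre_get_flanking_genes; infer_instance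

def pvWitness_get_flanking_genes : String × String × (List (String × List (List (String × String)))) × Int × Int :=
  ("a", "s", [("s", [[("gene_id", "a")], [("gene_id", "b")]])], 1, 1)

-- On inputs whose target gene is found at index i with -(len) < n_downstream < -(i+1), A's
-- downstream slice gets a negative stop and wraps, returning genes from the scaffold's end,
-- while B returns [] downstream — the intended result of asking for a non-positive number of genes.
def D_get_flanking_genes (target_gene_id : String) (scaffold : String) (gene_index : List (String × List (List (String × String)))) (n_upstream : Int) (n_downstream : Int) : Prop :=
  (let gs := (PySem.Dict.mk gene_index).getD scaffold []
   match gs.findIdx? (fun g => (PySem.Dict.mk g).get? "gene_id" == some target_gene_id) with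
   | some i => decide (n_downstream < -((i : Int) + 1) ∧ -(gs.length : Int) < n_downstream)
   | none => false) = true
instance (target_gene_id : String) (scaffold : String) (gene_index : List (String × List (List (String × String)))) (n_upstream : Int) (n_downstream : Int) : Decidable (D_get_flanking_genes target_gene_id scaffold gene_index n_upstream n_downstream) := by unfold D_get_flanking_genes; infer_instance

def Spec_get_flanking_genes (target_gene_id : String) (scaffold : String) (gene_index : List (String × List (List (String × String)))) (n_upstream : Int) (n_downstream : Int) (out : (List (List (String × String))) × (List (List (String × String)))) : Prop := ¬ D_get_flanking_genes target_gene_id scaffold gene_index n_upstream n_downstream → out = get_flanking_genes_alt target_gene_id scaffold gene_index n_upstream n_downstream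
instance (target_gene_id : String) (scaffold : String) (gene_index : List (String × List (List (String × String)))) (n_upstream : Int) (n_downstream : Int) (out : (List (List (String × String))) × (List (List (String × String)))) : Decidable (Spec_get_flanking_genes target_gene_id scaffold gene_index n_upstream n_downstream out) := by unfold Spec_get_flanking_genes; infer_instance

def pvDiffWitness_get_flanking_genes : String × String × (List (String × List (List (String × String)))) × Int × Int :=
  ("a", "s", [("s", [[("gene_id", "a")], [("gene_id", "b")], [("gene_id", "c")]])], 0, -2)

def pvDiffWitnessOut_get_flanking_genes : ((List (List (String × String))) × (List (List (String × String)))) × ((List (List (String × String))) × (List (List (String × String)))) :=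
  (([], [[("gene_id", "b")]]), ([], []))

-- ===== CLAIM (what is proved, stated in full; the proofs are below) =====
def Claim_unchanged_get_flanking_genes : Prop := ∀ (target_gene_id : String) (scaffold : String) (gene_index : List (String × List (List (String × String)))) (n_upstream : Int) (n_downstream : Int), Dom_get_flanking_genes target_gene_id scaffold gene_index n_upstream n_downstream → Pre_get_flanking_genes target_gene_id scaffold gene_index n_upstream n_downstream → Spec_get_flanking_genes target_gene_id scaffold gene_index n_upstream n_downstream (get_flanking_genes target_gene_id scaffold gene_index n_upstream n_downstream)
def Claim_changed_get_flanking_genes : Prop := Dom_get_flanking_genes (pvDiffWitness_get_flanking_genes.1) (pvDiffWitness_get_flanking_genes.2.1) (pvDiffWitness_get_flanking_genes.2.2.1) (pvDiffWitness_get_flanking_genes.2.2.2.1) (pvDiffWitness_get_flanking_genes.2.2.2.2) ∧ Pre_get_flanking_genes (pvDiffWitness_get_flanking_genes.1) (pvDiffWitness_get_flanking_genes.2.1) (pvDiffWitness_get_flanking_genes.2.2.1) (pvDiffWitness_get_flanking_genes.2.2.2.1) (pvDiffWitness_get_flanking_genes.2.2.2.2) ∧ D_get_flanking_genes (pvDiffWitness_get_flanking_genes.1)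 (pvDiffWitness_get_flanking_genes.2.1) (pvDiffWitness_get_flanking_genes.2.2.1) (pvDiffWitness_get_flanking_genes.2.2.2.1) (pvDiffWitness_get_flanking_genes.2.2.2.2) ∧ get_flanking_genes (pvDiffWitness_get_flanking_genes.1) (pvDiffWitness_get_flanking_genes.2.1) (pvDiffWitness_get_flanking_genes.2.2.1) (pvDiffWitness_get_flanking_genes.2.2.2.1) (pvDiffWitness_get_flanking_genes.2.2.2.2) = pvDiffWitnessOut_get_flanking_genes.1 ∧ get_flanking_genes_alt (pvDiffWitness_get_flanking_genes.1) (pvDiffWitness_get_flanking_genes.2.1) (pvDiffWitness_get_flanking_genes.2.2.1) (pvDiffWitness_get_flanking_genes.2.2.2.1) (pvDiffWitness_get_flanking_genes.2.2.2.2) = pvDiffWitnessOut_get_flanking_genes.2 ∧ pvDiffWitnessOut_get_flanking_genes.1 ≠ pvDiffWitnessOut_get_flanking_genes.2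
def Claim_exact_get_flanking_genes : Prop := ∀ (target_gene_id : String) (scaffold : String) (gene_index : List (String × List (List (String × String)))) (n_upstream : Int) (n_downstream : Int), Dom_get_flanking_genes target_gene_id scaffold gene_index n_upstream n_downstream → Pre_get_flanking_genes target_gene_id scaffold gene_index n_upstream n_downstream → D_get_flanking_genes target_gene_id scaffold gene_index n_upstream n_downstream → get_flanking_genes target_gene_id scaffold gene_index n_upstream n_downstream ≠ get_flanking_genes_alt target_gene_id scaffold gene_index n_upstream n_downstream

-- ===== LEMMAS AND PROOFS =====

-- the last (at most) k elements of a list: B's sliding window after consuming that list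
def pvLastK (k : Nat) (l : List (List (String × String))) : List (List (String × String)) := l.drop (l.length - k)

lemma pvTakeDown_eq (nd : Int) : ∀ (l acc : List (List (String × String))),
    pvTakeDown nd acc l = acc ++ l.take (nd.toNat - acc.length) := by
  intro l
  induction l with
  | nil => intro acc; simp [pvTakeDown]
  | cons g rest ih =>
    intro acc
    rw [pvTakeDown]
    split_ifs with h
    · have : nd.toNat - acc.length = 0 := by omega
      simp [this]
    · have hs : nd.toNat - acc.length = (nd.toNat - (acc.length + 1)) + 1 := by omega
      rw [ih (acc ++ [g]), hs]
      simp

lemma pvLastK_append_left (k : Nat) (x s : List (List (String × String))) :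
    pvLastK k (pvLastK k x ++ s) = pvLastK k (x ++ s) := by
  simp only [pvLastK, List.drop_append, List.drop_drop, List.length_drop, List.length_append]
  congr 1
  · congr 1
    omega
  · congr 1
    omega

lemma pvFindLoop_eq (t : String) : ∀ (l : List (List (String × String))) (c : Nat),
    pvFindLoop t c l = (l.findIdx? (fun g => (PySem.Dict.mk g).get? "gene_id" == some t)).map (· + c) := by
  intro l
  induction l with
  | nil => intro c; simp [pvFindLoop]
  | cons g rest ih =>
    intro c
    by_cases hp : (PySem.Dict.mk g).get? "gene_id" = some t
    · simp [pvFindLoop, hp, List.findIdx?_cons]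
    · simp only [pvFindLoop, hp, if_false, List.findIdx?_cons, beq_iff_eq]
      rw [ih (c + 1), Option.map_map]
      cases rest.findIdx? (fun g => (PySem.Dict.mk g).get? "gene_id" == some t) with
      | none => simp
      | some j => simp; omega

lemma pvFindIdx_lt_length {p : List (String × String) → Bool} :
    ∀ {l : List (List (String × String))} {i : Nat}, l.findIdx? p = some i → i < l.length := by
  intro l
  induction l with
  | nil => intro i h; simp at h
  | cons g rest ih =>
    intro i h
    rw [List.findIdx?_cons] at h
    split_ifs at h with hp
    · simp only [List.length_cons]; simp at h; omega
    · cases hf : rest.findIdx? p with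
      | none => rw [hf] at h; simp at h
      | some j =>
        rw [hf] at h; simp at h
        have := ih hf
        simp only [List.length_cons]
        omega

lemma pvScan_eq (t : String) (nu nd : Int) :
    ∀ (l w : List (List (String × String))), w.length ≤ nu.toNat →
      pvScan t nu nd w l =
        match l.findIdx? (fun g => (PySem.Dict.mk g).get? "gene_id" == some t) with
        | none => ([], [])
        | some j => ((pvLastK nu.toNat (w ++ l.take j)).reverse, pvTakeDown nd [] (l.drop (j + 1))) := by
  intro l
  induction l with
  | nil => intro w _; simp [pvScan]
  | cons g rest ih =>
    intro w hw
    by_cases hp : (PySem.Dict.mk g).get? "gene_id" = some t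
    · have h0 : w.length - nu.toNat = 0 := by omega
      simp [pvScan, hp, List.findIdx?_cons, pvLastK, h0]
    · have hstep : (if ((w ++ [g]).length : Int) > nu then (w ++ [g]).drop 1 else w ++ [g])
          = pvLastK nu.toNat (w ++ [g]) := by
        rw [pvLastK]
        split_ifs with h
        · congr 1
          simp only [List.length_append, List.length_cons, List.length_nil] at h ⊢
          omega
        · have h0 : (w ++ [g]).length - nu.toNat = 0 := by
            simp only [List.length_append, List.length_cons, List.length_nil] at h ⊢
            omega
          rw [h0, List.drop_zero]
      have hlen : (pvLastK nu.toNat (w ++ [g])).length ≤ nu.toNat := by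
        simp [pvLastK]; omega
      rw [pvScan]
      rw [if_neg hp]
      show pvScan t nu nd (if ((w ++ [g]).length : Int) > nu then (w ++ [g]).drop 1 else w ++ [g]) rest = _
      rw [hstep, ih _ hlen]
      rw [List.findIdx?_cons]
      have hpb : ((PySem.Dict.mk g).get? "gene_id" == some t) = false := by
        simp [hp]
      rw [hpb, if_neg (by simp)]
      cases hf : rest.findIdx? (fun g => (PySem.Dict.mk g).get? "gene_id" == some t) with
      | none => simp
      | some j =>
        simp only [Option.map_some]
        rw [pvLastK_append_left]
        simp [List.append_assoc]

lemma pvSlice_up (gs : List (List (String × String))) (i : Nat) (nu : Int) (hi : i < gs.length) :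
    PySem.List.slice gs (some (max 0 ((i : Int) - nu))) (some (i : Int)) = pvLastK nu.toNat (gs.take i) := by
  have hl : (gs.take i).length = i := by simp; omega
  rw [pvLastK, hl, List.drop_take]
  simp only [PySem.List.slice, PySem.List.clampIdx]
  have hm : ¬ (max 0 ((i : Int) - nu) < 0) := by
    have := le_max_left 0 ((i : Int) - nu); omega
  rw [if_neg hm, if_neg (by omega : ¬ ((i : Int) < 0))]
  by_cases hnu : 0 ≤ nu
  · have h1 : min (max 0 ((i : Int) - nu)).toNat gs.length = i - nu.toNat := by omega
    have h2 : min (i : Int).toNat gs.length = i := by omega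
    rw [h1, h2]
  · have h1 : min (i : Int).toNat gs.length - min (max 0 ((i : Int) - nu)).toNat gs.length = 0 := by omega
    have h2 : i - (i - nu.toNat) = 0 := by omega
    rw [h1, h2]
    simp

lemma pvSlice_down (gs : List (List (String × String))) (i : Nat) (nd : Int) (hi : i < gs.length)
    (hD : ¬ (nd < -((i : Int) + 1) ∧ -(gs.length : Int) < nd)) :
    PySem.List.slice gs (some ((i : Int) + 1)) (some ((i : Int) + 1 + nd)) = (gs.drop (i + 1)).take nd.toNat := by
  simp only [PySem.List.slice, PySem.List.clampIdx]
  rw [if_neg (by omega : ¬ ((i : Int) + 1 < 0))]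
  have hA : min ((i : Int) + 1).toNat gs.length = i + 1 := by omega
  split_ifs with h1 h2
  · -- stop < 0, len + stop < 0 : empty
    rw [hA]
    have : (0 : Nat) - (i + 1) = 0 := by omega
    rw [this]
    have hnd : nd.toNat = 0 := by omega
    simp [hnd]
  · -- stop < 0, len + stop ≥ 0 : outside D_ the converted stop is ≤ i+1, so empty
    rw [hA]
    have hst : ((gs.length : Int) + ((i : Int) + 1 + nd)).toNat - (i + 1) = 0 := by omega
    rw [hst]
    have hnd : nd.toNat = 0 := by omega
    simp [hnd]
  · -- stop ≥ 0
    rw [hA]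
    have hlen : (gs.drop (i + 1)).length = gs.length - (i + 1) := by simp
    rw [List.take_eq_take_iff, hlen]
    omega

lemma pvPorts_eq (target_gene_id scaffold : String) (gene_index : List (String × List (List (String × String)))) (n_upstream n_downstream : Int)
    (hD : ¬ D_get_flanking_genes target_gene_id scaffold gene_index n_upstream n_downstream) :
    get_flanking_genes target_gene_id scaffold gene_index n_upstream n_downstream
      = get_flanking_genes_alt target_gene_id scaffold gene_index n_upstream n_downstream := by
  have hgs : (PySem.Dict.mk gene_index).getD scaffold [] = (PySem.Dict.mk gene_index).getD scaffold [] := rfl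
  simp only [get_flanking_genes, get_flanking_genes_alt]
  set gs := (PySem.Dict.mk gene_index).getD scaffold []
  rw [pvScan_eq _ _ _ _ [] (by simp), pvFindLoop_eq]
  cases hf : gs.findIdx? (fun g => (PySem.Dict.mk g).get? "gene_id" == some target_gene_id) with
  | none => by_cases hnil : gs = [] <;> simp [hnil, hf]
  | some i =>
    have hi : i < gs.length := pvFindIdx_lt_length hf
    have hnil : ¬ gs = [] := by intro h; rw [h] at hi; simp at hi
    simp only [D_get_flanking_genes] at hD
    rw [hf] at hD
    simp only [decide_eq_true_eq] at hD
    simp only [hf, if_neg hnil, Option.map_some, Nat.add_zero]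
    rw [pvSlice_up gs i n_upstream hi, pvSlice_down gs i n_downstream hi hD]
    rw [pvTakeDown_eq]
    simp

-- ===== VERDICT (by name: the statement is the Claim_ definition above) =====
theorem get_flanking_genes_spec : Claim_unchanged_get_flanking_genes := by
  intro t s gi nu nd _ _ hD
  exact pvPorts_eq t s gi nu nd hD

theorem get_flanking_genes_changed : Claim_changed_get_flanking_genes := by
  unfold Claim_changed_get_flanking_genes; decide

theorem get_flanking_genes_tight : Claim_exact_get_flanking_genes := by
  intro t s gi nu nd _ _ hD
  simp only [get_flanking_genes, get_flanking_genes_alt]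
  simp only [D_get_flanking_genes] at hD
  set gs := (PySem.Dict.mk gi).getD s []
  cases hf : gs.findIdx? (fun g => (PySem.Dict.mk g).get? "gene_id" == some t) with
  | none => rw [hf] at hD; simp at hD
  | some i =>
    rw [hf] at hD
    simp only [decide_eq_true_eq] at hD
    have hi : i < gs.length := pvFindIdx_lt_length hf
    have hnil : ¬ gs = [] := by intro h; rw [h] at hi; simp at hi
    rw [pvScan_eq _ _ _ _ [] (by simp), pvFindLoop_eq, hf]
    simp only [if_neg hnil, Option.map_some, Nat.add_zero]
    intro heq
    have h2 := congrArg (fun x => x.2.length) heq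
    simp only [PySem.List.length_slice] at h2
    rw [pvTakeDown_eq] at h2
    have hnd : nd.toNat = 0 := by omega
    simp only [hnd, List.length_nil, Nat.sub_zero, List.take_zero, List.nil_append,
      List.append_nil, List.length_nil] at h2
    simp only [PySem.List.clampIdx] at h2
    rw [if_neg (by omega : ¬ ((i : Int) + 1 < 0)), if_pos (by omega : (i : Int) + 1 + nd < 0),
      if_neg (by omega : ¬ ((gs.length : Int) + ((i : Int) + 1 + nd) < 0))] at h2
    omega
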